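-- pv_equiv track=rewrite | github.com/musicmonk42/VulcanAMI_LLM | src/vulcan/planning.py | achieve_consensus
-- ===== SOURCE A (Python) =====
-- from typing import Any, Dict, List, Optional, Tuple, Set, Union, Callable
--
-- def achieve_consensus(proposals: Dict[str, Any]) -> Any:
--     """Achieve consensus using BFT."""
--     if not proposals:
--         return None
--
--     values = list(proposals.values())
--     n = len(values)
--
--     if n == 1:
--         return values[0]
--
--     f = (n - 1) // 3
--     threshold = n - f
--
--     from collections import Counter
--     vote_counts = Counter(str(v) for v in values)
--
--     for value_str, count in vote_counts.most_common():
--         if count >= threshold: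
--             for v in values:
--                 if str(v) == value_str:
--                     return v
--
--     return values[0]
-- ===== SOURCE B (Python) =====
-- def achieve_consensus(proposals):
--     """Achieve consensus using BFT (Boyer-Moore majority vote + verification)."""
--     if not proposals:
--         return None
--
--     values = list(proposals.values())
--     n = len(values)
--     threshold = n - (n - 1) // 3
--
--     # Single pass: Boyer-Moore majority vote over str(v).
--     cand = None
--     cnt = 0
--     for v in values:
--         s = str(v)
--         if cnt == 0:
--             cand, cnt = s, 1
--         elif s == cand:
--             cnt += 1
--         else:
--             cnt -= 1
--
--     # Verification pass: count matches and record first matching original value.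
--     count = 0
--     rep = None
--     for v in values:
--         if str(v) == cand:
--             count += 1
--             if rep is None:
--                 rep = v
--
--     if count >= threshold:
--         return rep
--     return values[0]
-- ===== Notes on version B (the rewrite author's own statement) =====
-- stated objective: alternative
-- what changed: Replaces the Counter + most_common sort + scan with a single-pass Boyer-Moore majority vote (valid because the threshold n-(n-1)//3 exceeds n/2, so at most one value can qualify) followed by one verification pass that records the first matching original value.
import Mathlib
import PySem

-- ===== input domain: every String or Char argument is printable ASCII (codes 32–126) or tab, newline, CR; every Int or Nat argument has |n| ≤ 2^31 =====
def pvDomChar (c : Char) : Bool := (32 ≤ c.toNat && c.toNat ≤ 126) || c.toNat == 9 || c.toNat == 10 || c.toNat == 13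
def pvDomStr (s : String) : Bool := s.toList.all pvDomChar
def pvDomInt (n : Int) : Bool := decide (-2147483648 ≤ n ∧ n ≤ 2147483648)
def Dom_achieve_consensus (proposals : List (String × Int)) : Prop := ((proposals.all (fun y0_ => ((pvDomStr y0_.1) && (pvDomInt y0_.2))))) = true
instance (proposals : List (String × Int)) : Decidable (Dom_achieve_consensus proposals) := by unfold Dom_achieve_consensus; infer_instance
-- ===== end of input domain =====

-- B replaces Counter + most_common sort + rescan by one Boyer–Moore majority-vote pass plus one
-- verification pass (sound because the threshold exceeds n/2, so at most one value can qualify);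
-- same return value on every input; objective: alternative algorithm.

-- ===== PORT A =====
-- inner 'for v in values: if str(v) == value_str: return v'
def acFindStr (s : String) : List Int → Option Int
  | [] => none
  | v :: rest => if PySem.Int.toStr v == s then some v else acFindStr s rest

-- outer 'for value_str, count in vote_counts.most_common(): if count >= threshold: …'
def acLoop (values : List Int) (threshold : Int) : List (String × Int) → Option Int
  | [] => none
  | (s, c) :: rest =>
      if threshold ≤ c then
        match acFindStr s values with
        | some v => some v
        | none => acLoop values threshold rest
      else acLoop values threshold rest

def achieve_consensus (proposals : List (String × Int)) : Option Int :=
  let d := PySem.Dict.ofList proposals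
  if d.size = 0 then none
  else
    let values := d.values
    let n : Int := PySem.List.len values
    if n = 1 then PySem.List.pyGet? values 0
    else
      let f := PySem.Int.floordiv (n - 1) 3
      let threshold := n - f
      let vote_counts := PySem.Dict.counter (values.map (fun v => PySem.Int.toStr v))
      match acLoop values threshold
          (PySem.List.sorted vote_counts.items (fun p => p.2) true) with
      | some v => some v
      | none => PySem.List.pyGet? values 0

-- ===== PORT B =====
-- one Boyer–Moore step on the (candidate, counter) state
def bmStep (st : Option String × Int) (s : String) : Option String × Int :=
  if st.2 = 0 then (some s, 1)
  else if some s = st.1 then (st.1, st.2 + 1)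
  else (st.1, st.2 - 1)

def achieve_consensus_alt (proposals : List (String × Int)) : Option Int :=
  let d := PySem.Dict.ofList proposals
  if d.size = 0 then none
  else
    let values := d.values
    let n : Int := PySem.List.len values
    let threshold := n - PySem.Int.floordiv (n - 1) 3
    -- Boyer–Moore pass over str(v)
    let st := values.foldl (fun st v => bmStep st (PySem.Int.toStr v)) (none, 0)
    -- verification pass: count matches, record the first matching original value
    let cr := values.foldl
      (fun (p : Int × Option Int) v =>
        if some (PySem.Int.toStr v) = st.1 then
          (p.1 + 1, if p.2 = none then some v else p.2)
        else p)
      (0, none)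
    if threshold ≤ cr.1 then cr.2
    else PySem.List.pyGet? values 0

-- ===== PRECONDITION & SPEC =====
def Spec_achieve_consensus (proposals : List (String × Int)) (out : Option Int) : Prop := out = achieve_consensus_alt proposals
instance (proposals : List (String × Int)) (out : Option Int) : Decidable (Spec_achieve_consensus proposals out) := by unfold Spec_achieve_consensus; infer_instance

-- ===== CLAIM (what is proved, stated in full; the proofs are below) =====
def Claim_equal_achieve_consensus : Prop := ∀ (proposals : List (String × Int)), Dom_achieve_consensus proposals → Spec_achieve_consensus proposals (achieve_consensus proposals)

-- ===== LEMMAS AND PROOFS =====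

-- two distinct elements' counts sum to at most the length
theorem pv_count_two {α : Type} [DecidableEq α] (l : List α) (x y : α) (hxy : x ≠ y) :
    l.count x + l.count y ≤ l.length := by
  induction l with
  | nil => simp
  | cons a l ih =>
      simp only [List.count_cons, List.length_cons]
      by_cases hx : a = x <;> by_cases hy : a = y <;> simp_all <;> omega

-- Boyer–Moore invariant over an abstract already-processed prefix
theorem pv_bm_inv (l : List String) : ∀ (pre : List String) (st : Option String × Int),
    0 ≤ st.2 →
    (∀ x : String, 2 * (pre.count x : Int) ≤ (pre.length : Int) - st.2 +
        (if st.1 = some x then 2 * st.2 else 0)) →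
    0 ≤ (l.foldl bmStep st).2 ∧
      ∀ x : String, 2 * ((pre ++ l).count x : Int) ≤ ((pre ++ l).length : Int) - (l.foldl bmStep st).2 +
        (if (l.foldl bmStep st).1 = some x then 2 * (l.foldl bmStep st).2 else 0) := by
  induction l with
  | nil => intro pre st h0 hinv; simpa using ⟨h0, hinv⟩
  | cons a l ih =>
      intro pre st h0 hinv
      have hstep : 0 ≤ (bmStep st a).2 ∧
          ∀ x : String, 2 * ((pre ++ [a]).count x : Int) ≤ ((pre ++ [a]).length : Int) - (bmStep st a).2 +
            (if (bmStep st a).1 = some x then 2 * (bmStep st a).2 else 0) := by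
        unfold bmStep
        split_ifs with h1 h2
        · -- counter was 0: adopt a
          refine ⟨by norm_num, fun x => ?_⟩
          have hx := hinv x
          have hx0 : 2 * ((pre.count x : Int)) ≤ (pre.length : Int) := by
            rcases Decidable.em (st.1 = some x) with h | h <;> simp [h, h1] at hx <;> omega
          by_cases hax : a = x <;>
            simp [List.count_append, hax] <;> omega
        · -- a matches the candidate
          refine ⟨by omega, fun x => ?_⟩
          have hx := hinv x
          by_cases hax : a = x
          · subst hax
            rw [← h2] at hx ⊢
            simp only [] at hx ⊢
            simp [List.count_append]
            omega
          · have hne : st.1 ≠ some x := by rw [← h2]; simp [hax]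
            simp only [if_neg hne] at hx ⊢
            simp [List.count_append, hax]
            omega
        · -- a differs from the candidate: decrement
          refine ⟨by omega, fun x => ?_⟩
          have hx := hinv x
          by_cases hax : a = x
          · have hne : st.1 ≠ some x := by subst hax; exact fun h => h2 h.symm
            rw [if_neg hne] at hx ⊢
            simp [List.count_append, hax]
            omega
          · rcases Decidable.em (st.1 = some x) with h | h
            · rw [if_pos h] at hx ⊢
              simp [List.count_append, hax]
              omega
            · rw [if_neg h] at hx ⊢
              simp [List.count_append, hax]
              omega
      have := ih (pre ++ [a]) (bmStep st a) hstep.1 hstep.2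
      simpa [List.append_assoc] using this

-- Boyer–Moore majority: a strict majority element is the surviving candidate
theorem pv_bm_majority (l : List String) (x : String)
    (hmaj : (l.length : Int) < 2 * (l.count x : Int)) :
    (l.foldl bmStep (none, 0)).1 = some x := by
  have h := pv_bm_inv l [] (none, 0) (by norm_num) (by intro x; simp)
  rcases h with ⟨h0, hinv⟩
  have hx := hinv x
  by_contra hne
  simp only [List.nil_append, if_neg hne] at hx
  omega

-- the surviving candidate is an element that occurred in the list
theorem pv_bm_cand_mem (l : List String) : ∀ (st : Option String × Int) (x : String),
    (l.foldl bmStep st).1 = some x → st.1 = some x ∨ x ∈ l := by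
  induction l with
  | nil => intro st x h; exact Or.inl h
  | cons a l ih =>
      intro st x h
      rcases ih (bmStep st a) x h with h' | h'
      · unfold bmStep at h'
        split_ifs at h' with h1 h2
        · simp at h'; simp [h']
        · exact Or.inl h'
        · exact Or.inl h'
      · simp [h']

-- the verification fold computes (count of matches, first matching value)
theorem pv_verify_fold (l : List Int) (s : String) : ∀ (c : Int) (r : Option Int),
    l.foldl
      (fun (p : Int × Option Int) v =>
        if some (PySem.Int.toStr v) = some s then
          (p.1 + 1, if p.2 = none then some v else p.2)
        else p)
      (c, r)
    = (c + (l.countP (fun v => PySem.Int.toStr v == s) : Int),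
       if r = none then acFindStr s l else r) := by
  induction l with
  | nil => intro c r; cases r <;> simp [acFindStr]
  | cons a l ih =>
      intro c r
      rw [List.foldl_cons]
      by_cases ha : PySem.Int.toStr a = s
      · rw [if_pos (by simp [ha]), ih]
        refine Prod.ext ?_ ?_
        · simp only [List.countP_cons, ha]
          simp
          omega
        · cases r <;> simp [acFindStr, ha]
      · have hb : (PySem.Int.toStr a == s) = false := by simpa using ha
        rw [if_neg (by simp [ha]), ih]
        simp [hb, acFindStr]

-- membership makes the inner scan succeed
theorem pv_acFindStr_isSome (l : List Int) (s : String)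
    (hs : s ∈ l.map (fun v => PySem.Int.toStr v)) : ∃ v, acFindStr s l = some v := by
  induction l with
  | nil => simp at hs
  | cons a l ih =>
      by_cases ha : PySem.Int.toStr a = s
      · exact ⟨a, by simp [acFindStr, ha]⟩
      · simp only [List.map_cons, List.mem_cons] at hs
        rcases hs with hs | hs
        · exact absurd hs.symm ha
        · obtain ⟨v, hv⟩ := ih hs
          exact ⟨v, by simp [acFindStr, ha, hv]⟩

-- the outer loop falls through when no entry reaches the threshold
theorem pv_acLoop_none (values : List Int) (t : Int) (L : List (String × Int))
    (h : ∀ p ∈ L, ¬ t ≤ p.2) : acLoop values t L = none := by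
  induction L with
  | nil => rfl
  | cons p L ih =>
      obtain ⟨s, c⟩ := p
      have hc := h (s, c) (by simp)
      simp only [acLoop, if_neg hc]
      exact ih fun q hq => h q (by simp [hq])

-- the outer loop returns the unique qualifying entry's first matching value
theorem pv_acLoop_unique (values : List Int) (t : Int) (s : String) (cnt : Int) (v : Int)
    (hfind : acFindStr s values = some v) (ht : t ≤ cnt) :
    ∀ L : List (String × Int), (∀ q ∈ L, t ≤ q.2 → q = (s, cnt)) → (s, cnt) ∈ L →
      acLoop values t L = some v := by
  intro L
  induction L with
  | nil => intro _ h; simp at h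
  | cons p L ih =>
      intro huniq hmem
      obtain ⟨s', c'⟩ := p
      by_cases hc : t ≤ c'
      · have := huniq (s', c') (by simp) hc
        simp only [Prod.mk.injEq] at this
        simp [acLoop, hc, this.1, hfind]
      · simp only [acLoop, if_neg hc]
        have hmem' : (s, cnt) ∈ L := by
          rcases List.mem_cons.mp hmem with h | h
          · exact absurd (by simp only [Prod.mk.injEq] at h; omega : t ≤ c') hc
          · exact h
        exact ih (fun q hq => huniq q (by simp [hq])) hmem'

-- bounds for (n-1)//3
theorem pv_fd_bounds (n : Int) :
    3 * PySem.Int.floordiv (n - 1) 3 ≤ n - 1 ∧ n - 1 < 3 * PySem.Int.floordiv (n - 1) 3 + 3 := by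
  constructor
  · have := (PySem.Int.le_floordiv_iff_mul_le (a := n - 1) (b := 3)
      (q := PySem.Int.floordiv (n - 1) 3) (by norm_num)).mp le_rfl
    omega
  · have := (PySem.Int.floordiv_lt_iff_lt_mul (a := n - 1) (b := 3)
      (q := PySem.Int.floordiv (n - 1) 3 + 1) (by norm_num)).mp (by omega)
    omega

-- count over the mapped strings is countP over the values
theorem pv_count_map (l : List Int) (s : String) :
    (l.map (fun v => PySem.Int.toStr v)).count s = l.countP (fun v => PySem.Int.toStr v == s) := by
  simp [List.count, List.countP_map, Function.comp_def]

-- the verification fold is inert when the candidate is still None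
theorem pv_verify_none (l : List Int) : ∀ (p0 : Int × Option Int),
    l.foldl
      (fun (p : Int × Option Int) v =>
        if some (PySem.Int.toStr v) = (none : Option String) then
          (p.1 + 1, if p.2 = none then some v else p.2)
        else p)
      p0 = p0 := by
  induction l with
  | nil => intro p0; rfl
  | cons a l ih => intro p0; rw [List.foldl_cons, if_neg (by simp)]; exact ih p0

-- core equivalence over the extracted list of values
theorem pv_main (values : List Int) (hne : values ≠ []) :
    (if PySem.List.len values = 1 then PySem.List.pyGet? values 0
     else
       match acLoop values
           (PySem.List.len values - PySem.Int.floordiv (PySem.List.len values - 1) 3)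
           (PySem.List.sorted (PySem.Dict.counter (values.map (fun v => PySem.Int.toStr v))).items
             (fun p => p.2) true) with
       | some v => some v
       | none => PySem.List.pyGet? values 0)
    =
    (if PySem.List.len values - PySem.Int.floordiv (PySem.List.len values - 1) 3 ≤
          (values.foldl
            (fun (p : Int × Option Int) v =>
              if some (PySem.Int.toStr v) =
                  (values.foldl (fun st v => bmStep st (PySem.Int.toStr v)) (none, 0)).1 then
                (p.1 + 1, if p.2 = none then some v else p.2)
              else p)
            (0, none)).1 then
        (values.foldl
          (fun (p : Int × Option Int) v =>
            if some (PySem.Int.toStr v) =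
                (values.foldl (fun st v => bmStep st (PySem.Int.toStr v)) (none, 0)).1 then
              (p.1 + 1, if p.2 = none then some v else p.2)
            else p)
          (0, none)).2
      else PySem.List.pyGet? values 0) := by
  set strs := values.map (fun v => PySem.Int.toStr v) with hstrs
  set n : Int := PySem.List.len values with hndef
  have hlen : n = (values.length : Int) := hndef.symm ▸ PySem.List.len_eq values
  have hslen : strs.length = values.length := by rw [hstrs, List.length_map]
  have hn1 : 1 ≤ n := by
    rw [hlen]
    have := List.length_pos_iff.mpr hne
    omega
  obtain ⟨hb1, hb2⟩ := pv_fd_bounds n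
  set q := PySem.Int.floordiv (n - 1) 3 with hqdef
  set t := n - q with htdef
  have hq0 : 0 ≤ q := by omega
  have ht1 : 1 ≤ t := by omega
  have h2t : n < 2 * t := by omega
  have hslen' : (strs.length : Int) = n := by rw [hslen, hlen]
  have hbm' : values.foldl (fun st v => bmStep st (PySem.Int.toStr v)) (none, 0)
      = strs.foldl bmStep (none, 0) := by rw [hstrs, List.foldl_map]
  by_cases hq : ∃ s ∈ strs, t ≤ (strs.count s : Int)
  · -- a value reaches the threshold: both sides return its first representative
    obtain ⟨s, hsmem, hscount⟩ := hq
    have hmaj : (strs.length : Int) < 2 * (strs.count s : Int) := by omega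
    have hcand : (strs.foldl bmStep (none, 0)).1 = some s := pv_bm_majority strs s hmaj
    obtain ⟨v, hv⟩ := pv_acFindStr_isSome values s (by rw [hstrs] at hsmem; exact hsmem)
    have hcountP : ((values.countP (fun v => PySem.Int.toStr v == s) : Nat) : Int)
        = (strs.count s : Int) := by rw [hstrs, pv_count_map]
    simp only [hbm', hcand]
    rw [pv_verify_fold values s 0 none]
    simp only [hv, zero_add]
    rw [if_pos (by omega : t ≤ ((values.countP (fun v => PySem.Int.toStr v == s) : Nat) : Int))]
    by_cases hone : n = 1
    · rw [if_pos hone]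
      have hl1 : values.length = 1 := by omega
      obtain ⟨v0, rfl⟩ := List.length_eq_one_iff.mp hl1
      rw [PySem.List.pyGet?_zero_cons]
      unfold acFindStr at hv
      split_ifs at hv
      · exact hv
      · exact absurd hv (by simp [acFindStr])
    · rw [if_neg hone]
      have huniq : ∀ p ∈ PySem.List.sorted (PySem.Dict.counter strs).items (fun p => p.2) true,
          t ≤ p.2 → p = (s, (strs.count s : Int)) := by
        intro p hp hpt
        have hp' : p ∈ (PySem.Dict.counter strs).items := (PySem.List.mem_sorted _ _ _ _).mp hp
        rw [PySem.Dict.items_counter] at hp'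
        obtain ⟨k, hk, rfl⟩ := List.mem_map.mp hp'
        have hk' : k ∈ strs := (PySem.Set.mem_ofList _ _).mp hk
        by_cases hks : k = s
        · rw [hks]
        · exfalso
          have := pv_count_two strs k s hks
          simp only at hpt
          omega
      have hmem : (s, (strs.count s : Int)) ∈
          PySem.List.sorted (PySem.Dict.counter strs).items (fun p => p.2) true := by
        rw [PySem.List.mem_sorted, PySem.Dict.items_counter]
        exact List.mem_map.mpr ⟨s, (PySem.Set.mem_ofList _ _).mpr hsmem, rfl⟩
      rw [pv_acLoop_unique values t s (strs.count s : Int) v hv hscount _ huniq hmem]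
      simp
  · -- no value reaches the threshold: both sides fall back to values[0]
    push Not at hq
    have hone : n ≠ 1 := by
      intro h1
      have hl1 : values.length = 1 := by omega
      obtain ⟨v0, rfl⟩ := List.length_eq_one_iff.mp hl1
      have := hq (PySem.Int.toStr v0) (by rw [hstrs]; simp)
      rw [hstrs] at this
      simp at this
      omega
    rw [if_neg hone]
    rw [pv_acLoop_none values t _ (by
      intro p hp
      have hp' : p ∈ (PySem.Dict.counter strs).items := (PySem.List.mem_sorted _ _ _ _).mp hp
      rw [PySem.Dict.items_counter] at hp'
      obtain ⟨k, hk, rfl⟩ := List.mem_map.mp hp'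
      have hk' : k ∈ strs := (PySem.Set.mem_ofList _ _).mp hk
      have := hq k hk'
      simp only
      omega)]
    cases hcand : (strs.foldl bmStep (none, 0)).1 with
    | none =>
        simp only [hbm', hcand]
        rw [pv_verify_none]
        rw [if_neg (by simp; omega)]
    | some s =>
        have hsmem : s ∈ strs := by
          rcases pv_bm_cand_mem strs (none, 0) s hcand with h | h
          · exact absurd h (by simp)
          · exact h
        have hcountP : ((values.countP (fun v => PySem.Int.toStr v == s) : Nat) : Int)
            = (strs.count s : Int) := by rw [hstrs, pv_count_map]
        have hlt := hq s hsmem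
        simp only [hbm', hcand]
        rw [pv_verify_fold values s 0 none]
        rw [if_neg (by simp; omega)]

-- ===== VERDICT (by name: the statement is the Claim_ definition above) =====
theorem achieve_consensus_spec : Claim_equal_achieve_consensus := by
  intro proposals _
  show achieve_consensus proposals = achieve_consensus_alt proposals
  by_cases hsz : (PySem.Dict.ofList proposals).size = 0
  · simp [achieve_consensus, achieve_consensus_alt, hsz]
  · have hne : (PySem.Dict.ofList proposals).values ≠ [] := by
      intro h
      apply hsz
      have : (PySem.Dict.ofList proposals).values.length = (PySem.Dict.ofList proposals).size := by
        simp [PySem.Dict.values, PySem.Dict.size]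
      rw [h] at this
      simpa using this.symm
    simp only [achieve_consensus, achieve_consensus_alt, if_neg hsz]
    exact pv_main ((PySem.Dict.ofList proposals).values) hne
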